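-- pv_equiv track=rewrite | github.com/mickyarun/LogManticsAI | LogManticsAI/llm_utils.py | get_common_keys_from_samples
-- ===== SOURCE A (Python) =====
-- def get_common_keys_from_samples(sample_entries):
--     """
--     Extract common keys from sample log entries.
--     Returns a list of keys that appear in at least 50% of samples.
--     """
--     if not sample_entries:
--         return []
--
--     # Count key occurrences across all samples
--     key_counts = {}
--     for entry in sample_entries:
--         for key in entry.keys():
--             key_counts[key] = key_counts.get(key, 0) + 1
--
--     # Find keys that appear in at least half of the samples
--     threshold = max(1, len(sample_entries) // 2)
--     common_keys = [key for key, count in key_counts.items() if count >= threshold]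
--
--     return common_keys
-- ===== SOURCE B (Python) =====
-- def get_common_keys_from_samples(sample_entries):
--     """
--     Extract common keys from sample log entries.
--     Returns a list of keys that appear in at least 50% of samples.
--     """
--     threshold = max(1, len(sample_entries) // 2)
--     unique_keys = dict.fromkeys(k for entry in sample_entries for k in entry)
--     return [k for k in unique_keys
--             if sum(1 for entry in sample_entries if k in entry) >= threshold]
-- ===== Notes on version B (the rewrite author's own statement) =====
-- stated objective: simpler
-- what changed: Replaces the mutable key_counts dictionary and items-filtering with a direct comprehension: build the ordered list of unique keys once, then keep each key whose per-entry membership count reaches the threshold; the explicit empty-input guard disappears.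
import Mathlib
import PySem

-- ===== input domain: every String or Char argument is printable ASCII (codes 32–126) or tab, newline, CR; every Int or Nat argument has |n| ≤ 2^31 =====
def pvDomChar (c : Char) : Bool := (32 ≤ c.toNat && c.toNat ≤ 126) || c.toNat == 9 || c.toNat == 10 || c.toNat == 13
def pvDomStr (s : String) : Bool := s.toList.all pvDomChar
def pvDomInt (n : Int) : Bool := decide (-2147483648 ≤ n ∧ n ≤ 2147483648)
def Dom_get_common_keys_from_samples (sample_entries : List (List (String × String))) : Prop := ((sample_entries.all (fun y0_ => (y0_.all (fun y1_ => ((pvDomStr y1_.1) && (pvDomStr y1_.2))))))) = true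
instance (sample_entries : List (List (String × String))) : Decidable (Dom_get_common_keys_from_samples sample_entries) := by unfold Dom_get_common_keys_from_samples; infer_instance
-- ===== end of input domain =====

-- B replaces A's mutable count-dictionary with a direct comprehension over the ordered unique keys (objective: simpler).
-- ===== PORT A =====
-- an entry is a Python dict; iterating its keys yields the distinct keys in first-insertion order
def get_common_keys_from_samples (sample_entries : List (List (String × String))) : List String :=
  if sample_entries = [] then []
  else
    let key_counts : PySem.Dict String Int :=
      sample_entries.foldl
        (fun d entry =>
          (PySem.List.dedup (entry.map Prod.fst)).foldl
            (fun d key => d.insert key (d.getD key 0 + 1)) d)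
        PySem.Dict.empty
    let threshold : Int := max 1 (PySem.Int.floordiv ((sample_entries.length : Int)) 2)
    (key_counts.items.filter (fun p => threshold ≤ p.2)).map Prod.fst

-- ===== PORT B =====
def get_common_keys_from_samples_alt (sample_entries : List (List (String × String))) : List String :=
  let threshold : Int := max 1 (PySem.Int.floordiv ((sample_entries.length : Int)) 2)
  let unique_keys : List String :=
    PySem.List.dedup (sample_entries.flatMap (fun entry => PySem.List.dedup (entry.map Prod.fst)))
  unique_keys.filter
    (fun k => threshold ≤ ((sample_entries.countP (fun entry => (entry.map Prod.fst).contains k) : Nat) : Int))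

-- ===== PRECONDITION & SPEC =====
def Spec_get_common_keys_from_samples (sample_entries : List (List (String × String))) (out : List String) : Prop := out = get_common_keys_from_samples_alt sample_entries
instance (sample_entries : List (List (String × String))) (out : List String) : Decidable (Spec_get_common_keys_from_samples sample_entries out) := by unfold Spec_get_common_keys_from_samples; infer_instance

-- ===== CLAIM (what is proved, stated in full; the proofs are below) =====
def Claim_equal_get_common_keys_from_samples : Prop := ∀ (sample_entries : List (List (String × String))), Dom_get_common_keys_from_samples sample_entries → Spec_get_common_keys_from_samples sample_entries (get_common_keys_from_samples sample_entries)

-- ===== LEMMAS AND PROOFS =====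

/-- A's nested loop over entries is the counter fold over the flattened key lists. -/
theorem foldl_inner_eq_flatMap (ses : List (List (String × String)))
    (d : PySem.Dict String Int) :
    ses.foldl
      (fun d entry =>
        (PySem.List.dedup (entry.map Prod.fst)).foldl
          (fun d key => d.insert key (d.getD key 0 + 1)) d) d
    = (ses.flatMap (fun entry => PySem.List.dedup (entry.map Prod.fst))).foldl
        (fun d key => d.insert key (d.getD key 0 + 1)) d := by
  induction ses generalizing d with
  | nil => rfl
  | cons e t ih =>
    simp only [List.foldl_cons, List.flatMap_cons, List.foldl_append]
    exact ih _

/-- A's items-filter-then-project equals filtering the key list by its count. -/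
theorem map_fst_filter_snd (c : String → Int) (thr : Int) (l : List String) :
    ((l.map (fun k => (k, c k))).filter (fun p => decide (thr ≤ p.2))).map Prod.fst
    = l.filter (fun k => decide (thr ≤ c k)) := by
  induction l with
  | nil => rfl
  | cons a t ih => by_cases h : thr ≤ c a <;> simp [h, ih]

/-- counting a key in the flattened key sets = counting the entries containing it -/
theorem count_flatMap_dedup (ses : List (List (String × String))) (k : String) :
    (ses.flatMap (fun entry => PySem.Set.ofList (entry.map Prod.fst))).count k
    = ses.countP (fun entry => (entry.map Prod.fst).contains k) := by
  induction ses with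
  | nil => rfl
  | cons e t ih =>
    rw [List.flatMap_cons, List.count_append, List.countP_cons, ih]
    have hnd := PySem.Set.nodup_ofList (e.map Prod.fst)
    by_cases hk : k ∈ PySem.Set.ofList (e.map Prod.fst)
    · have h1 : (PySem.Set.ofList (e.map Prod.fst)).count k = 1 :=
        List.count_eq_one_of_mem hnd hk
      have hc : (e.map Prod.fst).contains k = true := by
        rw [PySem.Set.mem_ofList] at hk
        simpa using hk
      rw [h1, hc, if_pos rfl]
      omega
    · have h0 : (PySem.Set.ofList (e.map Prod.fst)).count k = 0 :=
        List.count_eq_zero_of_not_mem hk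
      have hc : (e.map Prod.fst).contains k = false := by
        rw [PySem.Set.mem_ofList] at hk
        simpa using hk
      rw [h0, hc, if_neg Bool.false_ne_true]
      omega

-- ===== VERDICT (by name: the statement is the Claim_ definition above) =====
theorem get_common_keys_from_samples_spec : Claim_equal_get_common_keys_from_samples := by
  intro ses _
  unfold Spec_get_common_keys_from_samples get_common_keys_from_samples get_common_keys_from_samples_alt
  by_cases hs : ses = []
  · subst hs; rfl
  · rw [if_neg hs]
    rw [foldl_inner_eq_flatMap, PySem.Dict.foldl_insert_getD_add_one_eq_counter]
    dsimp only
    rw [PySem.Dict.items_counter, map_fst_filter_snd]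
    apply List.filter_congr
    intro k _
    simp only [PySem.List.dedup_eq_ofList]
    simp only [count_flatMap_dedup]
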